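-- pv_equiv track=rewrite | github.com/Juanje24/PracticasALF | main.py | rimalizer_asonante
-- ===== SOURCE A (Python) =====
-- def lista_a_palabra(lista):
--      return ''.join(lista)
--
-- def rimalizer_asonante(listamayus):
--     palabra_entonada=lista_a_palabra(listamayus)
--     inicio=False
--     terminacion=""
--     for i in range(len(palabra_entonada)):
--         if palabra_entonada[i] in ['A','E','I','O','U','Y']:
--             terminacion+=palabra_entonada[i]
--             inicio=True
--         if palabra_entonada[i] in ['a','e','i','o','u'] and inicio:
--             terminacion+=palabra_entonada[i]
--     return terminacion
-- ===== SOURCE B (Python) =====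
-- def rimalizer_asonante(listamayus):
--     s = ''.join(listamayus)
--     start = next((i for i, c in enumerate(s) if c in 'AEIOUY'), None)
--     if start is None:
--         return ''
--     return ''.join(c for c in s[start:] if c in 'AEIOUYaeiou')
-- ===== Notes on version B (the rewrite author's own statement) =====
-- stated objective: simpler
-- what changed: Replaced the flag-driven accumulating loop by a two-phase decomposition: find the index of the first uppercase vowel (anchor), then filter the tail for vowels and join once; no uppercase vowel means empty result.
import Mathlib
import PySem

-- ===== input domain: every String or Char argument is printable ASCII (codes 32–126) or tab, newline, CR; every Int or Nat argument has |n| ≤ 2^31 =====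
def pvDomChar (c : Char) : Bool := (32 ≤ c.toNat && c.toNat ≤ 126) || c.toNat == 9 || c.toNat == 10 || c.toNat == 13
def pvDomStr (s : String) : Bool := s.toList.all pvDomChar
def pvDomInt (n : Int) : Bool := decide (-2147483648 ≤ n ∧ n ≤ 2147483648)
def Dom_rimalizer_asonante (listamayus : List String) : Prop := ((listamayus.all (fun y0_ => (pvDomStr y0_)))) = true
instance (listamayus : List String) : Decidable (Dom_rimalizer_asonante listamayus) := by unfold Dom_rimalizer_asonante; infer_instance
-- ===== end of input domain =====

-- B replaces A's flag-driven accumulating loop by find-first-uppercase-vowel then filter-the-tail (objective: simpler decomposition).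

-- ===== PORT A =====
-- shared character classes (the literal lists from the Python sources)
def pvUP : List Char := ['A','E','I','O','U','Y']
def pvLO : List Char := ['a','e','i','o','u']

def lista_a_palabra (lista : List String) : String := PySem.Str.join "" lista

-- A's loop body: the two 'if's in order, state = (inicio, terminacion as List Char)
def pvStepA (st : Bool × List Char) (c : Char) : Bool × List Char :=
  let st := if pvUP.contains c then (true, st.2 ++ [c]) else st
  if pvLO.contains c && st.1 then (st.1, st.2 ++ [c]) else st

def rimalizer_asonante (listamayus : List String) : String :=
  let palabra_entonada := lista_a_palabra listamayus
  let st := palabra_entonada.toList.foldl pvStepA (false, ([] : List Char))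
  String.ofList st.2

-- ===== PORT B =====
def rimalizer_asonante_alt (listamayus : List String) : String :=
  let s := PySem.Str.join "" listamayus
  match s.toList.findIdx? (fun c => pvUP.contains c) with
  | none => ""
  | some i => String.ofList ((s.toList.drop i).filter (fun c => pvUP.contains c || pvLO.contains c))

-- ===== PRECONDITION & SPEC =====
def Spec_rimalizer_asonante (listamayus : List String) (out : String) : Prop := out = rimalizer_asonante_alt listamayus
instance (listamayus : List String) (out : String) : Decidable (Spec_rimalizer_asonante listamayus out) := by unfold Spec_rimalizer_asonante; infer_instance

-- ===== CLAIM (what is proved, stated in full; the proofs are below) =====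
def Claim_equal_rimalizer_asonante : Prop := ∀ (listamayus : List String), Dom_rimalizer_asonante listamayus → Spec_rimalizer_asonante listamayus (rimalizer_asonante listamayus)

-- ===== LEMMAS AND PROOFS =====

theorem pvLO_of_UP (c : Char) (h : c ∈ pvUP) : c ∉ pvLO := by
  simp [pvUP] at h
  rcases h with rfl|rfl|rfl|rfl|rfl|rfl <;> decide

-- once inicio is true, the loop appends exactly the vowels of the rest
theorem pv_foldl_true (l : List Char) (acc : List Char) :
    l.foldl pvStepA (true, acc)
      = (true, acc ++ l.filter (fun c => pvUP.contains c || pvLO.contains c)) := by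
  induction l generalizing acc with
  | nil => simp
  | cons c l ih =>
    by_cases hu : c ∈ pvUP
    · simp [pvStepA, hu, pvLO_of_UP c hu, ih]
    · by_cases hl : c ∈ pvLO
      · simp [pvStepA, hu, hl, ih]
      · simp [pvStepA, hu, hl, ih]

-- from inicio = false, the loop result is governed by the first uppercase vowel
theorem pv_foldl_false (l : List Char) (acc : List Char) :
    l.foldl pvStepA (false, acc)
      = match l.findIdx? (fun c => pvUP.contains c) with
        | none => (false, acc)
        | some i => (true, acc ++ (l.drop i).filter (fun c => pvUP.contains c || pvLO.contains c)) := by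
  induction l generalizing acc with
  | nil => simp
  | cons c l ih =>
    by_cases hu : c ∈ pvUP
    · simp [pvStepA, hu, pvLO_of_UP c hu, List.findIdx?_cons, pv_foldl_true]
    · have hstep : pvStepA (false, acc) c = (false, acc) := by
        simp [pvStepA, hu]
      rw [List.foldl_cons, hstep, ih]
      simp only [List.findIdx?_cons]
      cases h : l.findIdx? (fun c => pvUP.contains c) with
      | none => simp [hu]
      | some i => simp [hu]

-- ===== VERDICT (by name: the statement is the Claim_ definition above) =====
theorem rimalizer_asonante_spec : Claim_equal_rimalizer_asonante := by
  intro listamayus _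
  unfold Spec_rimalizer_asonante rimalizer_asonante rimalizer_asonante_alt lista_a_palabra
  simp only []
  rw [pv_foldl_false]
  cases h : (PySem.Str.join "" listamayus).toList.findIdx? (fun c => pvUP.contains c) with
  | none => rfl
  | some i => rfl
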